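-- pv_equiv track=rewrite | github.com/Vishalm999/Wave_Sales | reminder/reminder.py | _check_is_month_range
-- ===== SOURCE A (Python) =====
-- MONTH_MAP = {
--     "january": 1, "february": 2, "march": 3, "april": 4, "may": 5, "june": 6,
--     "july": 7, "august": 8, "september": 9, "october": 10, "november": 11, "december": 12
-- }
--
-- def _tokenize_query(text: str) -> list:
--     """Split text into lowercase tokens, preserving punctuation-stripped words."""
--     tokens = []
--     for tok in text.lower().replace('–', ' ').replace('—', ' ').split():
--         tokens.append(tok.strip('.,;:!?()"\''))
--     return tokens
--
-- def _check_is_month_range(query_lower: str) -> bool: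
--     """Check if query contains a pattern like 'month to month' or 'month - month'."""
--     tokens = _tokenize_query(query_lower)
--     for i, tok in enumerate(tokens):
--         if tok in MONTH_MAP:
--             # Check if next non-empty token is 'to' or '-' and token after is also a month
--             for j in range(i+1, min(i+4, len(tokens))):
--                 if tokens[j] in ('to', '-'):
--                     for k in range(j+1, min(j+4, len(tokens))):
--                         if tokens[k] in MONTH_MAP:
--                             return True
--     return False
-- ===== SOURCE B (Python) =====
-- MONTH_MAP = {
--     "january": 1, "february": 2, "march": 3, "april": 4, "may": 5, "june": 6,
--     "july": 7, "august": 8, "september": 9, "october": 10, "november": 11, "december": 12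
-- }
--
-- def _tokenize_query(text: str) -> list:
--     tokens = []
--     for tok in text.lower().replace('–', ' ').replace('—', ' ').split():
--         tokens.append(tok.strip('.,;:!?()"\''))
--     return tokens
--
-- def _check_is_month_range(query_lower: str) -> bool:
--     """Separator-pivoted scan: find a 'to'/'-' token with a month at most 3
--     tokens before it and a month at most 3 tokens after it."""
--     tokens = _tokenize_query(query_lower)
--     for j, tok in enumerate(tokens):
--         if tok in ('to', '-'):
--             if any(t in MONTH_MAP for t in tokens[max(0, j - 3):j]) and \
--                any(t in MONTH_MAP for t in tokens[j + 1:j + 4]):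
--                 return True
--     return False
-- ===== Notes on version B (the rewrite author's own statement) =====
-- stated objective: alternative
-- what changed: B replaces A's month-then-forward-separator-then-forward-month triple-nested scan with a single loop pivoted on the separator token ('to'/'-'), checking the 3-token windows before and after it for a month via slices.
import Mathlib
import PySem

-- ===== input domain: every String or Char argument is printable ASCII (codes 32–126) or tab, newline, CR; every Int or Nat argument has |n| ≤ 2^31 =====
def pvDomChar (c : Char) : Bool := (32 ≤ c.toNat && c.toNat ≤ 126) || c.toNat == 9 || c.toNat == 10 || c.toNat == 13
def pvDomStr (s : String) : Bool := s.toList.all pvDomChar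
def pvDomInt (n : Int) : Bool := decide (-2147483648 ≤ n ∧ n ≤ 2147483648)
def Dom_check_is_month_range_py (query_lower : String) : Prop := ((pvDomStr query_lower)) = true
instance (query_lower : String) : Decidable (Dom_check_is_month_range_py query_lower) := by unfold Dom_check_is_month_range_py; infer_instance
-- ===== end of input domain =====

-- B pivots the scan on the separator token ('to'/'-') and looks up to 3 tokens
-- backward and forward for months, instead of A's month→separator→month nested
-- forward scans; same result, simpler single outer loop (objective: alternative).

-- ===== PORT A =====
def monthMap : PySem.Dict String Int :=
  PySem.Dict.ofList [("january", 1), ("february", 2), ("march", 3), ("april", 4),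
    ("may", 5), ("june", 6), ("july", 7), ("august", 8), ("september", 9),
    ("october", 10), ("november", 11), ("december", 12)]

-- _tokenize_query: lower, replace en/em dashes by spaces, split on whitespace, strip punctuation
def tokenize_query (text : String) : List String :=
  (PySem.Str.split₀ (PySem.Str.replace (PySem.Str.replace (PySem.Str.lower text) "–" " ") "—" " ")).foldl
    (fun tokens tok => tokens ++ [PySem.Str.stripChars tok ".,;:!?()\"'"]) []

def check_is_month_range_py (query_lower : String) : Bool :=
  let tokens := tokenize_query query_lower
  (PySem.List.enumerate tokens 0).any (fun it =>
    PySem.Dict.contains monthMap it.2 &&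
      (PySem.List.pyRange (it.1 + 1) (min (it.1 + 4) (tokens.length : Int)) 1).any (fun j =>
        ((PySem.List.pyGetD tokens j "") == "to" || (PySem.List.pyGetD tokens j "") == "-") &&
          (PySem.List.pyRange (j + 1) (min (j + 4) (tokens.length : Int)) 1).any (fun k =>
            PySem.Dict.contains monthMap (PySem.List.pyGetD tokens k ""))))

-- ===== PORT B =====
def check_is_month_range_py_alt (query_lower : String) : Bool :=
  let tokens := tokenize_query query_lower
  (PySem.List.enumerate tokens 0).any (fun it =>
    (it.2 == "to" || it.2 == "-") &&
      ((PySem.List.slice tokens (some (max 0 (it.1 - 3))) (some it.1)).any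
          (fun t => PySem.Dict.contains monthMap t) &&
        (PySem.List.slice tokens (some (it.1 + 1)) (some (it.1 + 4))).any
          (fun t => PySem.Dict.contains monthMap t)))

-- ===== PRECONDITION & SPEC =====
def Spec_check_is_month_range_py (query_lower : String) (out : Bool) : Prop := out = check_is_month_range_py_alt query_lower
instance (query_lower : String) (out : Bool) : Decidable (Spec_check_is_month_range_py query_lower out) := by unfold Spec_check_is_month_range_py; infer_instance

-- ===== CLAIM (what is proved, stated in full; the proofs are below) =====
def Claim_equal_check_is_month_range_py : Prop := ∀ (query_lower : String), Dom_check_is_month_range_py query_lower → Spec_check_is_month_range_py query_lower (check_is_month_range_py query_lower)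

-- ===== LEMMAS AND PROOFS =====

-- index characterisation of membership in a clipped window (ts.drop a).take n
lemma mem_window {α : Type} (ts : List α) (a n : Nat) (x : α) :
    x ∈ (ts.drop a).take n ↔ ∃ i : Nat, a ≤ i ∧ i < a + n ∧ ∃ h : i < ts.length, ts[i] = x := by
  rw [List.mem_iff_getElem]
  constructor
  · rintro ⟨i, hi, rfl⟩
    have hlen : i < n ∧ a + i < ts.length := by
      simp [List.length_take, List.length_drop] at hi; omega
    refine ⟨a + i, by omega, by omega, hlen.2, ?_⟩
    rw [List.getElem_take, List.getElem_drop]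
  · rintro ⟨i, h1, h2, h, rfl⟩
    refine ⟨i - a, ?_, ?_⟩
    · simp [List.length_take, List.length_drop]; omega
    · rw [List.getElem_take, List.getElem_drop]; congr 1; omega

-- the common characterisation: a month, then within 3 tokens a separator, then within 3 tokens a month
def HasRange (ts : List String) : Prop :=
  ∃ x j y : Nat, x < j ∧ j ≤ x + 3 ∧ j < y ∧ y ≤ j + 3 ∧ y < ts.length ∧
    PySem.Dict.contains monthMap (ts.getD x "") = true ∧
    (ts.getD j "" = "to" ∨ ts.getD j "" = "-") ∧
    PySem.Dict.contains monthMap (ts.getD y "") = true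

lemma A_iff (ts : List String) :
    ((PySem.List.enumerate ts 0).any (fun it =>
      PySem.Dict.contains monthMap it.2 &&
        (PySem.List.pyRange (it.1 + 1) (min (it.1 + 4) (ts.length : Int)) 1).any (fun j =>
          ((PySem.List.pyGetD ts j "") == "to" || (PySem.List.pyGetD ts j "") == "-") &&
            (PySem.List.pyRange (j + 1) (min (j + 4) (ts.length : Int)) 1).any (fun k =>
              PySem.Dict.contains monthMap (PySem.List.pyGetD ts k ""))))) = true
    ↔ HasRange ts := by
  simp only [List.any_eq_true, PySem.List.mem_enumerate_iff, PySem.List.mem_pyRange_one,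
    Bool.and_eq_true, Bool.or_eq_true, beq_iff_eq]
  constructor
  · rintro ⟨it, ⟨k, hk, rfl⟩, hm, j, ⟨hj1, hj2⟩, hsep, y, ⟨hy1, hy2⟩, hmy⟩
    simp only at hm hj1 hj2
    obtain ⟨jn, rfl⟩ : ∃ n : Nat, j = (n : Int) := ⟨j.toNat, by omega⟩
    obtain ⟨yn, rfl⟩ : ∃ n : Nat, y = (n : Int) := ⟨y.toNat, by omega⟩
    refine ⟨k, jn, yn, by omega, by omega, by omega, by omega, by omega, ?_, ?_, ?_⟩
    · rwa [List.getD_eq_getElem ts "" hk]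
    · simpa [PySem.List.pyGetD_natCast, List.getD] using hsep
    · simpa [PySem.List.pyGetD_natCast, List.getD] using hmy
  · rintro ⟨x, j, y, h1, h2, h3, h4, h5, hmx, hsep, hmy⟩
    have hx : x < ts.length := by omega
    refine ⟨(0 + (x : Int), ts[x]), ⟨x, hx, rfl⟩, ?_, (j : Int), ⟨by omega, by omega⟩, ?_,
      (y : Int), ⟨by omega, by omega⟩, ?_⟩
    · rwa [List.getD_eq_getElem ts "" hx] at hmx
    · simpa [PySem.List.pyGetD_natCast, List.getD] using hsep
    · simpa [PySem.List.pyGetD_natCast, List.getD] using hmy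


lemma B_iff (ts : List String) :
    ((PySem.List.enumerate ts 0).any (fun it =>
      (it.2 == "to" || it.2 == "-") &&
        ((PySem.List.slice ts (some (max 0 (it.1 - 3))) (some it.1)).any
            (fun t => PySem.Dict.contains monthMap t) &&
          (PySem.List.slice ts (some (it.1 + 1)) (some (it.1 + 4))).any
            (fun t => PySem.Dict.contains monthMap t)))) = true
    ↔ HasRange ts := by
  simp only [List.any_eq_true, PySem.List.mem_enumerate_iff,
    Bool.and_eq_true, Bool.or_eq_true, beq_iff_eq]
  constructor
  · rintro ⟨it, ⟨k, hk, rfl⟩, hsep, ⟨tb, htb, hmb⟩, ⟨tf, htf, hmf⟩⟩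
    simp only at hsep htb htf
    have e1 : max 0 ((k : Int) - 3) = ((k - 3 : Nat) : Int) := by omega
    have e2 : (0 : Int) + (k : Int) = ((k : Nat) : Int) := by omega
    rw [e2] at htb htf; rw [e1, PySem.List.slice_natCast] at htb
    have e3 : ((k : Nat) : Int) + 1 = ((k + 1 : Nat) : Int) := by push_cast; omega
    have e4 : ((k : Nat) : Int) + 4 = ((k + 4 : Nat) : Int) := by push_cast; omega
    rw [e3, e4, PySem.List.slice_natCast] at htf
    rw [mem_window] at htb htf
    obtain ⟨x, hx1, hx2, hxl, rfl⟩ := htb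
    obtain ⟨y, hy1, hy2, hyl, rfl⟩ := htf
    refine ⟨x, k, y, by omega, by omega, by omega, by omega, by omega, ?_, ?_, ?_⟩
    · rwa [List.getD_eq_getElem ts "" hxl]
    · rw [List.getD_eq_getElem ts "" hk]; exact hsep
    · rwa [List.getD_eq_getElem ts "" hyl]
  · rintro ⟨x, j, y, h1, h2, h3, h4, h5, hmx, hsep, hmy⟩
    have hj : j < ts.length := by omega
    have hx : x < ts.length := by omega
    rw [List.getD_eq_getElem ts "" hx] at hmx
    rw [List.getD_eq_getElem ts "" hj] at hsep
    rw [List.getD_eq_getElem ts "" h5] at hmy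
    refine ⟨(0 + (j : Int), ts[j]), ⟨j, hj, rfl⟩, hsep, ?_, ?_⟩
    · have e1 : max 0 ((0 : Int) + (j : Int) - 3) = ((j - 3 : Nat) : Int) := by omega
      have e2 : (0 : Int) + (j : Int) = ((j : Nat) : Int) := by omega
      rw [e1, e2, PySem.List.slice_natCast]
      exact ⟨ts[x], (mem_window ts (j - 3) (j - (j - 3)) _).2 ⟨x, by omega, by omega, hx, rfl⟩, hmx⟩
    · have e3 : (0 : Int) + (j : Int) + 1 = ((j + 1 : Nat) : Int) := by push_cast; omega
      have e4 : (0 : Int) + (j : Int) + 4 = ((j + 4 : Nat) : Int) := by push_cast; omega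
      rw [e3, e4, PySem.List.slice_natCast]
      exact ⟨ts[y], (mem_window ts (j + 1) ((j + 4) - (j + 1)) _).2 ⟨y, by omega, by omega, h5, rfl⟩, hmy⟩


-- ===== VERDICT (by name: the statement is the Claim_ definition above) =====
theorem check_is_month_range_py_spec : Claim_equal_check_is_month_range_py := by
  intro q _
  unfold Spec_check_is_month_range_py check_is_month_range_py check_is_month_range_py_alt
  generalize tokenize_query q = ts
  rw [Bool.eq_iff_iff, A_iff, B_iff]
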